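-- pv_equiv track=rewrite | github.com/thumbe12856/competitive-programming | code-jam/2020/Round1-A/1.py | check_postfix
-- ===== SOURCE A (Python) =====
-- def check_postfix(max_postfix, pattern):
-- 	length = min(len(max_postfix), len(pattern))
-- 	ret = True
-- 	for i in range(1, length + 1):
-- 		if pattern[-i] == "*":
-- 			break
-- 		elif max_postfix[-i] != pattern[-i]:
-- 			ret = False
-- 			break
-- 	return ret
-- ===== SOURCE B (Python) =====
-- def check_postfix(max_postfix, pattern):
--     length = min(len(max_postfix), len(pattern))
--     m = max_postfix[len(max_postfix) - length:]
--     p = pattern[len(pattern) - length:]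
--     idx = p.rfind('*')
--     return p[idx + 1:] == m[idx + 1:]
-- ===== Notes on version B (the rewrite author's own statement) =====
-- stated objective: simpler
-- what changed: Replaces A's end-to-front character-by-character loop with windowing both strings to the last min-length characters, one rfind('*') to locate the last star, and a single tail-slice comparison.
import Mathlib
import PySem

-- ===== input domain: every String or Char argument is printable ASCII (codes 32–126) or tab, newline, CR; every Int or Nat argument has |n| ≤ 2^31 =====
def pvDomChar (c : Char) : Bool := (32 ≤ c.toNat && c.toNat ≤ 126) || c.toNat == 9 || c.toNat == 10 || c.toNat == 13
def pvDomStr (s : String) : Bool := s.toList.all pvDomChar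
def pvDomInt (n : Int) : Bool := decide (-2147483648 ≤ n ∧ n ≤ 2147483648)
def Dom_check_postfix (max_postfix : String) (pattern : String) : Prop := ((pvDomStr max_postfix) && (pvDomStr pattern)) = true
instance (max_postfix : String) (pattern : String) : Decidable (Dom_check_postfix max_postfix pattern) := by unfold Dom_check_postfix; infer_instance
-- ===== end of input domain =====

-- B replaces A's end-to-front character loop by windowing both strings, locating the last '*'
-- with rfind once, and comparing the two tails after it (objective: simpler).

-- ===== PORT A =====
-- the for-loop with its two breaks, as upward recursion on i over range(1, length+1)
def checkLoopA (m p : List Char) (len : Nat) (i : Nat) : Bool :=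
  if _h : i ≤ len then
    match PySem.List.pyGet? p (-(i : Int)), PySem.List.pyGet? m (-(i : Int)) with
    | some pc, some mc =>
      if pc = '*' then true
      else if mc ≠ pc then false
      else checkLoopA m p len (i + 1)
    | _, _ => true   -- unreachable: 1 ≤ i ≤ len = min of the lengths, so both indexings succeed
  else true
termination_by len + 1 - i

def check_postfix (max_postfix : String) (pattern : String) : Bool :=
  let length := min (PySem.Str.len max_postfix) (PySem.Str.len pattern)
  checkLoopA max_postfix.toList pattern.toList length.toNat 1

-- ===== PORT B =====
def check_postfix_alt (max_postfix : String) (pattern : String) : Bool :=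
  let length := min (PySem.Str.len max_postfix) (PySem.Str.len pattern)
  let m := PySem.Str.slice max_postfix (some (PySem.Str.len max_postfix - length)) none
  let p := PySem.Str.slice pattern (some (PySem.Str.len pattern - length)) none
  let idx := PySem.Str.rfind p "*"
  PySem.Str.slice p (some (idx + 1)) none == PySem.Str.slice m (some (idx + 1)) none

-- ===== PRECONDITION & SPEC =====
def Spec_check_postfix (max_postfix : String) (pattern : String) (out : Bool) : Prop := out = check_postfix_alt max_postfix pattern
instance (max_postfix : String) (pattern : String) (out : Bool) : Decidable (Spec_check_postfix max_postfix pattern out) := by unfold Spec_check_postfix; infer_instance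

-- ===== CLAIM (what is proved, stated in full; the proofs are below) =====
def Claim_equal_check_postfix : Prop := ∀ (max_postfix : String) (pattern : String), Dom_check_postfix max_postfix pattern → Spec_check_postfix max_postfix pattern (check_postfix max_postfix pattern)

-- ===== LEMMAS AND PROOFS =====

-- A's loop, rephrased over the reversed windows: walk the two reversed windows in lockstep
def goRev : List Char → List Char → Bool
  | pc :: tp, mc :: tm =>
    if pc = '*' then true else if mc ≠ pc then false else goRev tp tm
  | _, _ => true

theorem rgo_zero (s sub : List Char) :
    PySem.Chars.rfind.go s sub 0 = if sub.isPrefixOf s then 0 else -1 := by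
  rw [PySem.Chars.rfind.go]
theorem rgo_succ (s sub : List Char) (j : Nat) :
    PySem.Chars.rfind.go s sub (j + 1) =
      if sub.isPrefixOf (s.drop (j + 1)) then ((j : Int) + 1) else PySem.Chars.rfind.go s sub j := by
  rw [PySem.Chars.rfind.go]; push_cast; ring_nf
theorem neg_one_le_rgo (s sub : List Char) (j : Nat) : -1 ≤ PySem.Chars.rfind.go s sub j := by
  induction j with
  | zero => rw [rgo_zero]; split_ifs <;> omega
  | succ j ih => rw [rgo_succ]; split_ifs <;> omega
theorem neg_one_le_rfind (s sub : List Char) : -1 ≤ PySem.Chars.rfind s sub := by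
  unfold PySem.Chars.rfind; exact neg_one_le_rgo s sub s.length
theorem star_prefix (l : List Char) : (['*'].isPrefixOf l) = (l.head? == some '*') := by
  cases l with
  | nil => simp [List.isPrefixOf]
  | cons a t =>
    by_cases h : a = '*' <;> simp [List.isPrefixOf, h]
    exact fun he => h he.symm
theorem rgo_star (s : List Char) (j : Nat) (hj : j < s.length) :
    (PySem.Chars.rfind.go s ['*'] j + 1).toNat =
      (j + 1) - ((s.take (j + 1)).reverse.findIdx (· == '*')) := by
  induction j with
  | zero =>
    rw [rgo_zero, star_prefix]
    cases s with
    | nil => simp at hj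
    | cons a t =>
      by_cases ha : a = '*' <;>
        simp [ha, List.findIdx_cons, Bool.cond_eq_ite, beq_iff_eq]
  | succ j ih =>
    rw [rgo_succ, star_prefix, List.head?_drop]
    have hj' : j < s.length := by omega
    have hget : s[j+1]? = some s[j+1] := List.getElem?_eq_getElem hj
    rw [hget]
    by_cases hstar : s[j+1] = '*'
    · simp only [hstar, beq_self_eq_true, if_true]
      have htake : s.take (j+2) = s.take (j+1) ++ ['*'] := by
        rw [List.take_add_one, List.getElem?_eq_getElem hj, hstar]; rfl
      have hrev : (s.take (j+2)).reverse = '*' :: (s.take (j+1)).reverse := by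
        rw [htake]; simp
      rw [hrev, List.findIdx_cons]
      simp only [beq_self_eq_true, cond_true]
      omega
    · have hne : (some s[j+1] == some '*') = false := by simp [hstar]
      rw [hne]
      simp only [if_neg (by simp : ¬ (false = true))]
      have htake : s.take (j+2) = s.take (j+1) ++ [s[j+1]] := by
        rw [List.take_add_one, List.getElem?_eq_getElem hj]; rfl
      have hrev : (s.take (j+2)).reverse = s[j+1] :: (s.take (j+1)).reverse := by
        rw [htake]; simp
      have hfi : ((s.take (j+2)).reverse.findIdx (· == '*')) = ((s.take (j+1)).reverse.findIdx (· == '*')) + 1 := by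
        rw [hrev, List.findIdx_cons, show (s[j+1] == '*') = false by simp [hstar]]
        simp only [cond_false]
      rw [hfi, ih hj']
      have hle : ((s.take (j+1)).reverse.findIdx (· == '*')) ≤ j + 1 := by
        have := List.findIdx_le_length (p := (· == '*')) (xs := (s.take (j+1)).reverse)
        simp at this; omega
      omega
theorem rfind_star (s : List Char) :
    (PySem.Chars.rfind s ['*'] + 1).toNat = s.length - s.reverse.findIdx (· == '*') := by
  unfold PySem.Chars.rfind
  cases s with
  | nil =>
    show (PySem.Chars.rfind.go [] ['*'] 0 + 1).toNat = _
    rw [rgo_zero]; simp [List.isPrefixOf]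
  | cons a t =>
    have hlen : (a :: t).length = t.length + 1 := rfl
    rw [hlen, rgo_succ]
    have : (a :: t).drop (t.length + 1) = [] := by simp
    rw [this]
    simp only [List.isPrefixOf]
    have h := rgo_star (a :: t) t.length (by simp)
    simpa using h

theorem loopA_eq_goRev (M P : List Char) (n : Nat) (hn : n = min M.length P.length) :
    ∀ (k i : Nat), 1 ≤ i → k = n + 1 - i →
      checkLoopA M P n i =
        goRev ((P.reverse.take n).drop (i - 1)) ((M.reverse.take n).drop (i - 1)) := by
  intro k
  induction k with
  | zero =>
    intro i hi hk
    have hin : n < i := by omega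
    rw [checkLoopA]
    rw [dif_neg (by omega)]
    have h1 : (P.reverse.take n).drop (i - 1) = [] := by
      apply List.drop_eq_nil_of_le; simp; omega
    rw [h1]; rfl
  | succ k ih =>
    intro i hi hk
    have hin : i ≤ n := by omega
    have hnM : n ≤ M.length := by omega
    have hnP : n ≤ P.length := by omega
    have hiP : i ≤ P.length := by omega
    have hiM : i ≤ M.length := by omega
    rw [checkLoopA, dif_pos hin]
    have hgP : PySem.List.pyGet? P (-(i : Int)) = P[P.length - i]? :=
      PySem.List.pyGet?_neg_natCast P i (by omega) (by omega)
    have hgM : PySem.List.pyGet? M (-(i : Int)) = M[M.length - i]? :=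
      PySem.List.pyGet?_neg_natCast M i (by omega) (by omega)
    have hP' : P[P.length - i]? = some (P[P.length - i]'(by omega)) := List.getElem?_eq_getElem (by omega)
    have hM' : M[M.length - i]? = some (M[M.length - i]'(by omega)) := List.getElem?_eq_getElem (by omega)
    rw [hgP, hgM, hP', hM']
    have hlenP : (P.reverse.take n).length = n := by simp; omega
    have hlenM : (M.reverse.take n).length = n := by simp; omega
    have hi1 : i - 1 < (P.reverse.take n).length := by omega
    have hi1M : i - 1 < (M.reverse.take n).length := by omega
    have hdP : (P.reverse.take n).drop (i - 1) =
        (P.reverse.take n)[i-1] :: (P.reverse.take n).drop (i - 1 + 1) :=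
      List.drop_eq_getElem_cons hi1
    have hdM : (M.reverse.take n).drop (i - 1) =
        (M.reverse.take n)[i-1] :: (M.reverse.take n).drop (i - 1 + 1) :=
      List.drop_eq_getElem_cons hi1M
    have heP : (P.reverse.take n)[i-1]'hi1 = P[P.length - i]'(by omega) := by
      rw [List.getElem_take, List.getElem_reverse]
      congr 1; omega
    have heM : (M.reverse.take n)[i-1]'hi1M = M[M.length - i]'(by omega) := by
      rw [List.getElem_take, List.getElem_reverse]
      congr 1; omega
    rw [hdP, hdM]
    show (if P[P.length - i]'(by omega) = '*' then true
          else if M[M.length - i]'(by omega) ≠ P[P.length - i]'(by omega) then false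
          else checkLoopA M P n (i + 1)) = _
    rw [goRev, heP, heM]
    by_cases h1 : P[P.length - i]'(by omega) = '*'
    · simp [h1]
    · rw [if_neg h1, if_neg h1]
      by_cases h2 : M[M.length - i]'(by omega) ≠ P[P.length - i]'(by omega)
      · rw [if_pos h2, if_pos h2]
      · rw [if_neg h2, if_neg h2]
        have := ih (i + 1) (by omega) (by omega)
        simpa [show i + 1 - 1 = i - 1 + 1 by omega] using this

theorem goRev_eq_take (RP : List Char) :
    ∀ RM : List Char, RP.length = RM.length →
      goRev RP RM =
        decide (RP.take (RP.findIdx (· == '*')) = RM.take (RP.findIdx (· == '*'))) := by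
  induction RP with
  | nil => intro RM h; simp [goRev]
  | cons pc tp ih =>
    intro RM h
    cases RM with
    | nil => simp at h
    | cons mc tm =>
      rw [goRev, List.findIdx_cons]
      by_cases h1 : pc = '*'
      · simp [h1]
      · rw [if_neg h1, show (pc == '*') = false by simp [h1]]
        simp only [cond_false, List.take_succ_cons]
        by_cases h2 : mc ≠ pc
        · rw [if_pos h2]
          symm
          rw [decide_eq_false_iff_not]
          simp only [List.cons.injEq, not_and]
          intro hpm _
          exact h2 hpm.symm
        · rw [if_neg h2]
          have h2' : mc = pc := not_ne_iff.mp h2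
          subst h2'
          rw [ih tm (by simpa using h)]
          simp [List.cons.injEq]

theorem rev_take_rev (l : List Char) (k : Nat) :
    (l.reverse.take k).reverse = l.drop (l.length - k) := by
  rw [List.take_reverse, List.reverse_reverse]

theorem beq_toList (s t : String) : (s == t) = decide (s.toList = t.toList) := by
  cases h : (s == t)
  · simp only [beq_eq_false_iff_ne] at h
    symm; rw [decide_eq_false_iff_not, String.toList_inj]; exact h
  · rw [beq_iff_eq] at h; subst h; simp

theorem check_postfix_spec : Claim_equal_check_postfix := by
  intro m p _
  unfold Spec_check_postfix
  have hlm : PySem.Str.len m = (m.toList.length : Int) := by simp [PySem.Str.len]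
  have hlp : PySem.Str.len p = (p.toList.length : Int) := by simp [PySem.Str.len]
  have hnM : min m.toList.length p.toList.length ≤ m.toList.length := by omega
  have hnP : min m.toList.length p.toList.length ≤ p.toList.length := by omega
  -- abbreviations (plain lets for readability inside the proof)
  have hA : check_postfix m p =
      goRev (p.toList.reverse.take (min m.toList.length p.toList.length))
            (m.toList.reverse.take (min m.toList.length p.toList.length)) := by
    show checkLoopA m.toList p.toList (min (PySem.Str.len m) (PySem.Str.len p)).toNat 1 = _
    have h1 : (min (PySem.Str.len m) (PySem.Str.len p)).toNat = min m.toList.length p.toList.length := by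
      rw [hlm, hlp]; omega
    rw [h1]
    have := loopA_eq_goRev m.toList p.toList (min m.toList.length p.toList.length) rfl
      (min m.toList.length p.toList.length) 1 (by omega) (by omega)
    simpa using this
  rw [hA, goRev_eq_take _ _ (by simp only [List.length_take, List.length_reverse]; omega)]
  simp only [check_postfix_alt]
  rw [beq_toList]
  -- the two windows, as lists
  have hpwL : (PySem.Str.slice p (some (PySem.Str.len p - min (PySem.Str.len m) (PySem.Str.len p))) none).toList
      = p.toList.drop (p.toList.length - min m.toList.length p.toList.length) := by
    rw [PySem.Str.toList_slice, PySem.Chars.slice_eq_listSlice,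
        PySem.List.slice_from _ (by rw [hlm, hlp]; omega)]
    congr 1
    rw [hlm, hlp]; omega
  have hmwL : (PySem.Str.slice m (some (PySem.Str.len m - min (PySem.Str.len m) (PySem.Str.len p))) none).toList
      = m.toList.drop (m.toList.length - min m.toList.length p.toList.length) := by
    rw [PySem.Str.toList_slice, PySem.Chars.slice_eq_listSlice,
        PySem.List.slice_from _ (by rw [hlm, hlp]; omega)]
    congr 1
    rw [hlm, hlp]; omega
  have hpwlen : (p.toList.drop (p.toList.length - min m.toList.length p.toList.length)).length
      = min m.toList.length p.toList.length := by simp; omega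
  have hmwlen : (m.toList.drop (m.toList.length - min m.toList.length p.toList.length)).length
      = min m.toList.length p.toList.length := by simp; omega
  have hrevP : (p.toList.drop (p.toList.length - min m.toList.length p.toList.length)).reverse
      = p.toList.reverse.take (min m.toList.length p.toList.length) := by
    have harg : p.toList.length - (p.toList.length - min m.toList.length p.toList.length)
        = min m.toList.length p.toList.length := by omega
    rw [List.reverse_drop, harg]
  have hrevM : (m.toList.drop (m.toList.length - min m.toList.length p.toList.length)).reverse
      = m.toList.reverse.take (min m.toList.length p.toList.length) := by
    have harg : m.toList.length - (m.toList.length - min m.toList.length p.toList.length)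
        = min m.toList.length p.toList.length := by omega
    rw [List.reverse_drop, harg]
  have hkn : (p.toList.reverse.take (min m.toList.length p.toList.length)).findIdx (· == '*')
      ≤ min m.toList.length p.toList.length := by
    have := List.findIdx_le_length (p := (· == '*'))
      (xs := p.toList.reverse.take (min m.toList.length p.toList.length))
    simp only [List.length_take, List.length_reverse] at this; omega
  have hidx : PySem.Str.rfind (PySem.Str.slice p (some (PySem.Str.len p - min (PySem.Str.len m) (PySem.Str.len p))) none) "*"
      = PySem.Chars.rfind (p.toList.drop (p.toList.length - min m.toList.length p.toList.length)) ['*'] := by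
    rw [PySem.Str.rfind_eq, hpwL]
    rfl
  have hnn : 0 ≤ PySem.Chars.rfind (p.toList.drop (p.toList.length - min m.toList.length p.toList.length)) ['*'] + 1 := by
    have := neg_one_le_rfind (p.toList.drop (p.toList.length - min m.toList.length p.toList.length)) ['*']
    omega
  have htoNat : (PySem.Chars.rfind (p.toList.drop (p.toList.length - min m.toList.length p.toList.length)) ['*'] + 1).toNat
      = min m.toList.length p.toList.length
        - (p.toList.reverse.take (min m.toList.length p.toList.length)).findIdx (· == '*') := by
    rw [rfind_star, hpwlen, hrevP]
  have h2 : (PySem.Str.slice (PySem.Str.slice p (some (PySem.Str.len p - min (PySem.Str.len m) (PySem.Str.len p))) none)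
        (some (PySem.Str.rfind (PySem.Str.slice p (some (PySem.Str.len p - min (PySem.Str.len m) (PySem.Str.len p))) none) "*" + 1)) none).toList
      = ((p.toList.reverse.take (min m.toList.length p.toList.length)).take
          ((p.toList.reverse.take (min m.toList.length p.toList.length)).findIdx (· == '*'))).reverse := by
    rw [PySem.Str.toList_slice, PySem.Chars.slice_eq_listSlice, hpwL, hidx,
        PySem.List.slice_from _ hnn, htoNat, ← hrevP, rev_take_rev, hpwlen]
  have h3 : (PySem.Str.slice (PySem.Str.slice m (some (PySem.Str.len m - min (PySem.Str.len m) (PySem.Str.len p))) none)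
        (some (PySem.Str.rfind (PySem.Str.slice p (some (PySem.Str.len p - min (PySem.Str.len m) (PySem.Str.len p))) none) "*" + 1)) none).toList
      = ((m.toList.reverse.take (min m.toList.length p.toList.length)).take
          ((p.toList.reverse.take (min m.toList.length p.toList.length)).findIdx (· == '*'))).reverse := by
    rw [PySem.Str.toList_slice, PySem.Chars.slice_eq_listSlice, hmwL, hidx,
        PySem.List.slice_from _ hnn, htoNat, ← hrevM, rev_take_rev, hmwlen]
  rw [h2, h3]
  simp [List.reverse_inj]
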